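-- pv_equiv track=rewrite | github.com/kelvinhuang0327/number-pattern-research | research/539_v7_final_backtest.py | get_habit_probs
-- ===== SOURCE A (Python) =====
-- def get_habit_probs(history):
--     # Calculate Echo/Neighbor probability per number
--     habits = {n: {'Echo': 1, 'Neighbor': 1, 'Hits': 5} for n in range(1, 40)}
--     for i in range(1, len(history)):
--         curr = set(history[i]['numbers']); prev = set(history[i-1]['numbers'])
--         for n in curr:
--             habits[n]['Hits'] += 1
--             if n in prev: habits[n]['Echo'] += 1
--             if (n-1 in prev) or (n+1 in prev): habits[n]['Neighbor'] += 1
--     return habits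
-- ===== SOURCE B (Python) =====
-- def get_habit_probs(history):
--     # Number-major decomposition: for each number 1..39 scan the consecutive
--     # draw pairs once, counting Hits/Echo/Neighbor, then build its row directly.
--     pairs = list(zip(history, history[1:]))
--     habits = {}
--     for n in range(1, 40):
--         echo = neighbor = hits = 0
--         for prev, curr in pairs:
--             if n in curr['numbers']:
--                 hits += 1
--                 p = prev['numbers']
--                 if n in p:
--                     echo += 1
--                 if (n - 1) in p or (n + 1) in p:
--                     neighbor += 1
--         habits[n] = {'Echo': echo + 1, 'Neighbor': neighbor + 1, 'Hits': hits + 5}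
--     return habits
-- ===== Notes on version B (the rewrite author's own statement) =====
-- stated objective: alternative
-- what changed: Replaced the draw-major loop that mutates a habits dict in place by a number-major computation: for each number 1..39 one scan over the consecutive-draw pairs counts Hits/Echo/Neighbor and the row is built directly, no dict mutation.
import Mathlib
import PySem

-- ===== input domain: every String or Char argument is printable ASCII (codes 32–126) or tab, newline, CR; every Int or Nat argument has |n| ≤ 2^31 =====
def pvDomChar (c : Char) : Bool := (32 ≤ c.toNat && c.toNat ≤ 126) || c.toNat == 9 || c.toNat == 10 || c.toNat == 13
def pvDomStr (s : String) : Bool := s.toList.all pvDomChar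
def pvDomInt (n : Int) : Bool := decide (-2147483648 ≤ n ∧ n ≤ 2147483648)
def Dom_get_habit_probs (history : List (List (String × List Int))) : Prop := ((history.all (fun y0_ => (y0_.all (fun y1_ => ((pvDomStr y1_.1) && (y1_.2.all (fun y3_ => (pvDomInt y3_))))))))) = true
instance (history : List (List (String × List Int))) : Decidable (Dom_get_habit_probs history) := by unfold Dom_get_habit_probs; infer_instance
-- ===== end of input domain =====

-- B replaces A's draw-major loop mutating a habits dict by a number-major scan: for each
-- number 1..39 one pass over consecutive-draw pairs counts Hits/Echo/Neighbor and builds the row.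

-- shared tiny helper: draw['numbers'] (total form; Pre_ guarantees the key is present where accessed)
def pvNums (d : List (String × List Int)) : List Int :=
  (PySem.Dict.mk d).getD "numbers" []

-- ===== PORT A =====
-- one iteration of A's inner 'for n in curr' body
def pvStepA (prev : PySem.Set Int) (habits : PySem.Dict Int (PySem.Dict String Int)) (n : Int) :
    PySem.Dict Int (PySem.Dict String Int) :=
  let habits := habits.modify n PySem.Dict.empty (fun m => m.modify "Hits" 0 (· + 1))
  let habits := if PySem.Set.contains prev n then
      habits.modify n PySem.Dict.empty (fun m => m.modify "Echo" 0 (· + 1)) else habits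
  if PySem.Set.contains prev (n - 1) || PySem.Set.contains prev (n + 1) then
      habits.modify n PySem.Dict.empty (fun m => m.modify "Neighbor" 0 (· + 1)) else habits

def get_habit_probs (history : List (List (String × List Int))) : List (Int × List (String × Int)) :=
  let habits : PySem.Dict Int (PySem.Dict String Int) :=
    PySem.Dict.mk ((PySem.List.pyRange 1 40 1).map
      (fun n => (n, PySem.Dict.mk [("Echo", 1), ("Neighbor", 1), ("Hits", 5)])))
  let habits := (PySem.List.pyRange 1 (history.length : Int) 1).foldl (fun habits i =>
      let curr := PySem.Set.ofList (pvNums (PySem.List.pyGetD history i []))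
      let prev := PySem.Set.ofList (pvNums (PySem.List.pyGetD history (i - 1) []))
      curr.foldl (fun h n => pvStepA prev h n) habits) habits
  habits.items.map (fun p => (p.1, p.2.items))

-- ===== PORT B =====
def get_habit_probs_alt (history : List (List (String × List Int))) : List (Int × List (String × Int)) :=
  let pairs := history.zip (history.drop 1)
  (PySem.List.pyRange 1 40 1).map (fun n =>
    let ehv : Int × Int × Int := pairs.foldl (fun acc pc =>
        if (pvNums pc.2).contains n then
          let p := pvNums pc.1
          (acc.1 + (if p.contains n then 1 else 0),
           acc.2.1 + (if p.contains (n - 1) || p.contains (n + 1) then 1 else 0),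
           acc.2.2 + 1)
        else acc) (0, 0, 0)
    (n, [("Echo", ehv.1 + 1), ("Neighbor", ehv.2.1 + 1), ("Hits", ehv.2.2 + 5)]))

-- ===== PRECONDITION & SPEC =====
-- Pre_ excludes exactly the inputs where the Python A raises KeyError: with at least two
-- draws, every draw must carry the key "numbers" and every number of a non-first draw must
-- lie in 1..39 (A indexes habits[n] unconditionally).
def Pre_get_habit_probs (history : List (List (String × List Int))) : Prop :=
  history.length ≤ 1 ∨
    ((∀ d ∈ history, (PySem.Dict.mk d).contains "numbers" = true) ∧
     ∀ d ∈ history.drop 1, ∀ n ∈ pvNums d, 1 ≤ n ∧ n ≤ 39)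
instance (history : List (List (String × List Int))) : Decidable (Pre_get_habit_probs history) := by
  unfold Pre_get_habit_probs; infer_instance

def pvWitness_get_habit_probs : (List (List (String × List Int))) :=
  [[("numbers", [1, 2])], [("numbers", [2, 5])]]

def Spec_get_habit_probs (history : List (List (String × List Int))) (out : List (Int × List (String × Int))) : Prop := out = get_habit_probs_alt history
instance (history : List (List (String × List Int))) (out : List (Int × List (String × Int))) : Decidable (Spec_get_habit_probs history out) := by unfold Spec_get_habit_probs; infer_instance

-- ===== CLAIM (what is proved, stated in full; the proofs are below) =====
def Claim_equal_get_habit_probs : Prop := ∀ (history : List (List (String × List Int))), Dom_get_habit_probs history → Pre_get_habit_probs history → Spec_get_habit_probs history (get_habit_probs history)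

-- ===== LEMMAS AND PROOFS =====

-- a row of the habits table and the map-form invariant of A's dict
def pvRow (e v h : Int) : PySem.Dict String Int :=
  PySem.Dict.mk [("Echo", e), ("Neighbor", v), ("Hits", h)]

def pvMkH (e v h : Int → Int) : PySem.Dict Int (PySem.Dict String Int) :=
  PySem.Dict.mk ((PySem.List.pyRange 1 40 1).map (fun n => (n, pvRow (e n) (v n) (h n))))

-- per-pair counters (Int-valued countP over the consecutive-pair list)
def pvCE (n : Int) (ps : List ((List (String × List Int)) × (List (String × List Int)))) : Int :=
  (ps.countP (fun p => (pvNums p.2).contains n && (pvNums p.1).contains n) : Int)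
def pvCV (n : Int) (ps : List ((List (String × List Int)) × (List (String × List Int)))) : Int :=
  (ps.countP (fun p => (pvNums p.2).contains n && ((pvNums p.1).contains (n - 1) || (pvNums p.1).contains (n + 1))) : Int)
def pvCH (n : Int) (ps : List ((List (String × List Int)) × (List (String × List Int)))) : Int :=
  (ps.countP (fun p => (pvNums p.2).contains n) : Int)

lemma pvRow_hits (e v h : Int) :
    (pvRow e v h).modify "Hits" 0 (· + 1) = pvRow e v (h + 1) := by
  simp [pvRow, PySem.Dict.modify, PySem.Dict.insert, PySem.Dict.getD, PySem.Dict.get?, PySem.Dict.contains]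

lemma pvRow_echo (e v h : Int) :
    (pvRow e v h).modify "Echo" 0 (· + 1) = pvRow (e + 1) v h := by
  simp [pvRow, PySem.Dict.modify, PySem.Dict.insert, PySem.Dict.getD, PySem.Dict.get?, PySem.Dict.contains]

lemma pvRow_nb (e v h : Int) :
    (pvRow e v h).modify "Neighbor" 0 (· + 1) = pvRow e (v + 1) h := by
  simp [pvRow, PySem.Dict.modify, PySem.Dict.insert, PySem.Dict.getD, PySem.Dict.get?, PySem.Dict.contains]

lemma pvMkH_congr {e v h e' v' h' : Int → Int}
    (he : ∀ n, e n = e' n) (hv : ∀ n, v n = v' n) (hh : ∀ n, h n = h' n) :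
    pvMkH e v h = pvMkH e' v' h' := by
  have : e = e' := funext he
  have : v = v' := funext hv
  have : h = h' := funext hh
  subst_vars; rfl

-- the outer modify at a key inside 1..39 rewrites exactly that row
lemma pvModify_mkH (e v h : Int → Int) (k : Int) (hk : k ∈ PySem.List.pyRange 1 40 1)
    (f : PySem.Dict String Int → PySem.Dict String Int) :
    (pvMkH e v h).modify k PySem.Dict.empty f =
      PySem.Dict.mk ((PySem.List.pyRange 1 40 1).map
        (fun n => (n, if n = k then f (pvRow (e k) (v k) (h k)) else pvRow (e n) (v n) (h n)))) := by
  have hnd : ((PySem.List.pyRange 1 40 1).map (fun n => (n, pvRow (e n) (v n) (h n)))).map Prod.fst |>.Nodup := by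
    simp [List.map_map, Function.comp_def]
    exact PySem.List.nodup_pyRange_one 1 40
  have hget : (pvMkH e v h).getD k PySem.Dict.empty = pvRow (e k) (v k) (h k) := by
    apply PySem.Dict.getD_of_mem_items
    · exact List.mem_map_of_mem hk
    · exact hnd
  have hcont : (pvMkH e v h).contains k = true := by
    have hb := PySem.List.mem_pyRange_one.mp hk
    simp [pvMkH, PySem.Dict.contains]
    omega
  rw [PySem.Dict.modify, PySem.Dict.insert, hget]
  simp only [hcont, if_true]
  congr 1
  show ((PySem.List.pyRange 1 40 1).map (fun n => (n, pvRow (e n) (v n) (h n)))).map _ = _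
  rw [List.map_map]
  refine List.map_congr_left (fun n _ => ?_)
  by_cases hn : n = k
  · subst hn; simp
  · simp [hn]

lemma pvModify_mkH_hits (e v h : Int → Int) (k : Int) (hk : k ∈ PySem.List.pyRange 1 40 1) :
    (pvMkH e v h).modify k PySem.Dict.empty (fun m => m.modify "Hits" 0 (· + 1)) =
      pvMkH e v (fun n => if n = k then h n + 1 else h n) := by
  rw [pvModify_mkH e v h k hk]
  unfold pvMkH
  congr 1
  refine List.map_congr_left (fun n _ => ?_)
  by_cases hn : n = k
  · subst hn; simp [pvRow_hits]
  · simp [hn]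

lemma pvModify_mkH_echo (e v h : Int → Int) (k : Int) (hk : k ∈ PySem.List.pyRange 1 40 1) :
    (pvMkH e v h).modify k PySem.Dict.empty (fun m => m.modify "Echo" 0 (· + 1)) =
      pvMkH (fun n => if n = k then e n + 1 else e n) v h := by
  rw [pvModify_mkH e v h k hk]
  unfold pvMkH
  congr 1
  refine List.map_congr_left (fun n _ => ?_)
  by_cases hn : n = k
  · subst hn; simp [pvRow_echo]
  · simp [hn]

lemma pvModify_mkH_nb (e v h : Int → Int) (k : Int) (hk : k ∈ PySem.List.pyRange 1 40 1) :
    (pvMkH e v h).modify k PySem.Dict.empty (fun m => m.modify "Neighbor" 0 (· + 1)) =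
      pvMkH e (fun n => if n = k then v n + 1 else v n) h := by
  rw [pvModify_mkH e v h k hk]
  unfold pvMkH
  congr 1
  refine List.map_congr_left (fun n _ => ?_)
  by_cases hn : n = k
  · subst hn; simp [pvRow_nb]
  · simp [hn]

lemma pvStepA_mkH (prev : PySem.Set Int) (e v h : Int → Int) (k : Int)
    (hk : k ∈ PySem.List.pyRange 1 40 1) :
    pvStepA prev (pvMkH e v h) k =
      pvMkH (fun n => if n = k ∧ PySem.Set.contains prev k then e n + 1 else e n)
            (fun n => if n = k ∧ (PySem.Set.contains prev (k - 1) || PySem.Set.contains prev (k + 1)) then v n + 1 else v n)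
            (fun n => if n = k then h n + 1 else h n) := by
  simp only [pvStepA]
  rw [pvModify_mkH_hits e v h k hk]
  by_cases hc1 : PySem.Set.contains prev k = true
  · rw [if_pos hc1, pvModify_mkH_echo _ _ _ k hk]
    by_cases hc2 : (PySem.Set.contains prev (k - 1) || PySem.Set.contains prev (k + 1)) = true
    · rw [if_pos hc2, pvModify_mkH_nb _ _ _ k hk]
      exact pvMkH_congr (fun n => by simp_all) (fun n => by simp_all) (fun n => rfl)
    · rw [if_neg hc2]
      exact pvMkH_congr (fun n => by simp_all) (fun n => by simp_all) (fun n => rfl)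
  · rw [if_neg hc1]
    by_cases hc2 : (PySem.Set.contains prev (k - 1) || PySem.Set.contains prev (k + 1)) = true
    · rw [if_pos hc2, pvModify_mkH_nb _ _ _ k hk]
      exact pvMkH_congr (fun n => by simp_all) (fun n => by simp_all) (fun n => rfl)
    · rw [if_neg hc2]
      exact pvMkH_congr (fun n => by simp_all) (fun n => by simp_all) (fun n => rfl)

lemma pvFoldSet (prev : PySem.Set Int) (ns : List Int) (hnd : ns.Nodup)
    (hr : ∀ n ∈ ns, n ∈ PySem.List.pyRange 1 40 1) (e v h : Int → Int) :
    ns.foldl (fun d n => pvStepA prev d n) (pvMkH e v h) =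
      pvMkH (fun n => if n ∈ ns ∧ PySem.Set.contains prev n then e n + 1 else e n)
            (fun n => if n ∈ ns ∧ (PySem.Set.contains prev (n - 1) || PySem.Set.contains prev (n + 1)) then v n + 1 else v n)
            (fun n => if n ∈ ns then h n + 1 else h n) := by
  induction ns generalizing e v h with
  | nil => exact (pvMkH_congr (fun n => by simp) (fun n => by simp) (fun n => by simp)).symm
  | cons a t ih =>
    have hat : a ∉ t := (List.nodup_cons.mp hnd).1
    have hndt := (List.nodup_cons.mp hnd).2
    have hrt : ∀ n ∈ t, n ∈ PySem.List.pyRange 1 40 1 := fun n hn => hr n (List.mem_cons_of_mem a hn)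
    simp only [List.foldl_cons]
    rw [pvStepA_mkH prev e v h a (hr a List.mem_cons_self)]
    rw [ih hndt hrt]
    refine pvMkH_congr (fun n => ?_) (fun n => ?_) (fun n => ?_) <;>
    · by_cases hn : n = a
      · subst hn
        simp [hat]
      · by_cases hnt : n ∈ t <;> simp [hn, hnt]

lemma pvCE_cons (n : Int) (p : (List (String × List Int)) × (List (String × List Int)))
    (t : List ((List (String × List Int)) × (List (String × List Int)))) :
    pvCE n (p :: t) = (if (pvNums p.2).contains n && (pvNums p.1).contains n then 1 else 0) + pvCE n t := by
  unfold pvCE; rw [List.countP_cons]; split <;> simp_all <;> omega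

lemma pvCV_cons (n : Int) (p : (List (String × List Int)) × (List (String × List Int)))
    (t : List ((List (String × List Int)) × (List (String × List Int)))) :
    pvCV n (p :: t) = (if (pvNums p.2).contains n && ((pvNums p.1).contains (n - 1) || (pvNums p.1).contains (n + 1)) then 1 else 0) + pvCV n t := by
  unfold pvCV; rw [List.countP_cons]; split <;> simp_all <;> omega

lemma pvCH_cons (n : Int) (p : (List (String × List Int)) × (List (String × List Int)))
    (t : List ((List (String × List Int)) × (List (String × List Int)))) :
    pvCH n (p :: t) = (if (pvNums p.2).contains n then 1 else 0) + pvCH n t := by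
  unfold pvCH; rw [List.countP_cons]; split <;> simp_all <;> omega

lemma pvFoldPairs (ps : List ((List (String × List Int)) × (List (String × List Int))))
    (hr : ∀ p ∈ ps, ∀ n ∈ pvNums p.2, n ∈ PySem.List.pyRange 1 40 1) (e v h : Int → Int) :
    ps.foldl (fun d p =>
        (PySem.Set.ofList (pvNums p.2)).foldl
          (fun d' n => pvStepA (PySem.Set.ofList (pvNums p.1)) d' n) d) (pvMkH e v h) =
      pvMkH (fun n => e n + pvCE n ps) (fun n => v n + pvCV n ps) (fun n => h n + pvCH n ps) := by
  induction ps generalizing e v h with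
  | nil =>
    exact (pvMkH_congr (fun n => by simp [pvCE]) (fun n => by simp [pvCV]) (fun n => by simp [pvCH])).symm
  | cons p t ih =>
    have hrp : ∀ n ∈ PySem.Set.ofList (pvNums p.2), n ∈ PySem.List.pyRange 1 40 1 := by
      intro n hn
      exact hr p List.mem_cons_self n ((PySem.Set.mem_ofList _ _).mp hn)
    have hrt : ∀ q ∈ t, ∀ n ∈ pvNums q.2, n ∈ PySem.List.pyRange 1 40 1 :=
      fun q hq => hr q (List.mem_cons_of_mem p hq)
    simp only [List.foldl_cons]
    rw [pvFoldSet _ _ (PySem.Set.nodup_ofList _) hrp]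
    rw [ih hrt]
    refine pvMkH_congr (fun n => ?_) (fun n => ?_) (fun n => ?_)
    · rw [pvCE_cons]
      by_cases h2 : n ∈ pvNums p.2 <;> by_cases h1 : n ∈ pvNums p.1 <;>
        simp [PySem.Set.mem_ofList, PySem.Set.contains, h1, h2] <;> ring
    · rw [pvCV_cons]
      by_cases h2 : n ∈ pvNums p.2 <;> by_cases hA : (n - 1) ∈ pvNums p.1 <;>
        by_cases hB : (n + 1) ∈ pvNums p.1 <;>
        simp [PySem.Set.mem_ofList, PySem.Set.contains, h2, hA, hB] <;> ring
    · rw [pvCH_cons]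
      by_cases h2 : n ∈ pvNums p.2 <;>
        simp [PySem.Set.mem_ofList, h2] <;> ring

lemma pvFoldB (ps : List ((List (String × List Int)) × (List (String × List Int)))) (n : Int)
    (acc : Int × Int × Int) :
    ps.foldl (fun acc pc =>
        if (pvNums pc.2).contains n then
          (acc.1 + (if (pvNums pc.1).contains n then 1 else 0),
           acc.2.1 + (if (pvNums pc.1).contains (n - 1) || (pvNums pc.1).contains (n + 1) then 1 else 0),
           acc.2.2 + 1)
        else acc) acc = (acc.1 + pvCE n ps, acc.2.1 + pvCV n ps, acc.2.2 + pvCH n ps) := by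
  induction ps generalizing acc with
  | nil => simp [pvCE, pvCV, pvCH]
  | cons p t ih =>
    simp only [List.foldl_cons]
    by_cases hc : (pvNums p.2).contains n = true
    · rw [if_pos hc, ih]
      rw [pvCE_cons, pvCV_cons, pvCH_cons]
      simp only [Prod.ext_iff, hc, Bool.true_and]
      refine ⟨?_, ?_, ?_⟩ <;> split_ifs <;> ring
    · rw [if_neg hc, ih]
      rw [pvCE_cons, pvCV_cons, pvCH_cons]
      have hmem : n ∉ pvNums p.2 := by simpa using hc
      simp [Prod.ext_iff, hmem]

lemma pvBridge {α β : Type} (xs : List α) (d : α) (g : β → α × α → β) (init : β) :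
    (PySem.List.pyRange 1 (xs.length : Int) 1).foldl
        (fun acc i => g acc (PySem.List.pyGetD xs (i - 1) d, PySem.List.pyGetD xs i d)) init =
      (xs.zip (xs.drop 1)).foldl g init := by
  have hmap : (PySem.List.pyRange 1 (xs.length : Int) 1).map
      (fun i => (PySem.List.pyGetD xs (i - 1) d, PySem.List.pyGetD xs i d)) = xs.zip (xs.drop 1) := by
    apply List.ext_getElem
    · simp only [List.length_map, PySem.List.length_pyRange_one, List.length_zip, List.length_drop]
      omega
    · intro k h1 h2
      have hlen : k < xs.length - 1 := by
        have := h1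
        simp [PySem.List.length_pyRange_one] at this
        omega
      simp only [List.getElem_map]
      rw [PySem.List.getElem_pyRange_one]
      have e1 : (1 : Int) + (k : Int) - 1 = ((k : Nat) : Int) := by push_cast; ring
      have e2 : (1 : Int) + (k : Int) = (((k + 1 : Nat)) : Int) := by push_cast; ring
      rw [e1, e2, PySem.List.pyGetD_natCast, PySem.List.pyGetD_natCast]
      rw [List.getD_eq_getElem _ _ (by omega), List.getD_eq_getElem _ _ (by omega)]
      rw [List.getElem_zip]
      simp only [List.getElem_drop, Prod.mk.injEq]
      exact And.intro (by first | rfl | trivial) (by congr 1; omega)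
  rw [← hmap, List.foldl_map]

-- ===== main proof =====
theorem get_habit_probs_spec : Claim_equal_get_habit_probs := by
  intro history _ hPre
  unfold Spec_get_habit_probs
  have hzip : history.length ≤ 1 → history.zip (history.drop 1) = [] := by
    intro hlen
    match history with
    | [] => rfl
    | [x] => rfl
    | a :: b :: t => simp at hlen
  have hr : ∀ p ∈ history.zip (history.drop 1), ∀ n ∈ pvNums p.2, n ∈ PySem.List.pyRange 1 40 1 := by
    intro p hp n hn
    rcases hPre with hlen | ⟨_, hrange⟩
    · rw [hzip hlen] at hp
      exact absurd hp (List.not_mem_nil)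
    · obtain ⟨a, b⟩ := p
      have h2 := (List.of_mem_zip hp).2
      have hb := hrange b h2 n hn
      exact PySem.List.mem_pyRange_one.mpr ⟨hb.1, by omega⟩
  have hinit : PySem.Dict.mk ((PySem.List.pyRange 1 40 1).map
      (fun n => (n, PySem.Dict.mk [("Echo", (1 : Int)), ("Neighbor", 1), ("Hits", 5)]))) =
      pvMkH (fun _ => 1) (fun _ => 1) (fun _ => 5) := rfl
  simp only [get_habit_probs, get_habit_probs_alt]
  rw [pvBridge history []
    (fun acc pr => (PySem.Set.ofList (pvNums pr.2)).foldl
      (fun h n => pvStepA (PySem.Set.ofList (pvNums pr.1)) h n) acc),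
    hinit, pvFoldPairs _ hr]
  unfold pvMkH
  rw [List.map_map]
  refine List.map_congr_left (fun n _ => ?_)
  rw [pvFoldB]
  simp only [Function.comp_apply, pvRow, Prod.mk.injEq, true_and]
  norm_num
  exact ⟨Int.add_comm _ _, Int.add_comm _ _, Int.add_comm _ _⟩
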